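-- pv_equiv track=rewrite | github.com/ppapalampidi/long_video_summarization | scripts/download.py | transcript_to_list
-- ===== SOURCE A (Python) =====
-- def is_integer(string):
--     try:
--         int(string)
--         return True
--     except:
--         return False
--
-- def transcript_to_list(captions):
--     line_index = 0
--     in_line = False
--     current_line = ["", ""]
--     lines = []
--     for item in captions:
--         if is_integer(item):
--             in_line = True
--             line_index = 0
--             current_line = ["", ""]
--             continue
--         if in_line:
--             current_line[line_index] = item
--             if line_index == 1:
--                 in_line = False
--                 line_index = 0
--                 lines.append(current_line)
--                 continue
--             line_index += 1
--     return lines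
-- ===== SOURCE B (Python) =====
-- def is_integer(string):
--     try:
--         int(string)
--         return True
--     except:
--         return False
--
--
-- def transcript_to_list(captions):
--     # Stateless pattern match: a pair starts exactly at an (integer, text, text) window.
--     flags = [is_integer(c) for c in captions]
--     return [[captions[i + 1], captions[i + 2]]
--             for i in range(len(captions) - 2)
--             if flags[i] and not flags[i + 1] and not flags[i + 2]]
-- ===== Notes on version B (the rewrite author's own statement) =====
-- stated objective: simpler
-- what changed: Replaced A's mutable scanner state (in_line flag, line_index, partially filled current_line) with a stateless positional characterization: precompute is_integer flags once and emit [captions[i+1], captions[i+2]] for every index i whose 3-window matches (integer, non-integer, non-integer).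
import Mathlib
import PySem

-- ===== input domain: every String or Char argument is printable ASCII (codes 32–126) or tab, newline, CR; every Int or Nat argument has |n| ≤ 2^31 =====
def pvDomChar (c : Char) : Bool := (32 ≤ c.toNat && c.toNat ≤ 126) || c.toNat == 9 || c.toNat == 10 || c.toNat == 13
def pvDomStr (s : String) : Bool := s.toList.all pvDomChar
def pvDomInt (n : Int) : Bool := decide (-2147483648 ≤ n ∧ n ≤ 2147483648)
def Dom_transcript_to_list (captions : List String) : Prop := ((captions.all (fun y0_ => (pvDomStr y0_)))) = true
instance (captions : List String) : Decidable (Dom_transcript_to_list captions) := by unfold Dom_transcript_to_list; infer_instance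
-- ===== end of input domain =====

-- B replaces A's mutable scanner state by a stateless 3-window pattern match over precomputed is_integer flags (simpler decomposition, same cost).

-- ===== PORT A =====
def is_integer (string : String) : Bool := (PySem.Int.ofStr? string).isSome

-- A's loop body; state = (line_index, in_line, current_line (2-slot), lines)
def pvAstep (st : Int × Bool × (String × String) × List (List String)) (item : String) :
    Int × Bool × (String × String) × List (List String) :=
  let (line_index, in_line, current_line, lines) := st
  if is_integer item then (0, true, ("", ""), lines)
  else if in_line then
    let current_line := if line_index == 0 then (item, current_line.2) else (current_line.1, item)
    if line_index == 1 then (0, false, current_line, lines ++ [[current_line.1, current_line.2]])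
    else (line_index + 1, in_line, current_line, lines)
  else (line_index, in_line, current_line, lines)

def transcript_to_list (captions : List String) : List (List String) :=
  (captions.foldl pvAstep (0, false, ("", ""), [])).2.2.2

-- ===== PORT B =====
-- Source B: flags list built once, then a comprehension over range(len-2); all indices are in
-- range in Python, so List.getD with a default is exact here.
def transcript_to_list_alt (captions : List String) : List (List String) :=
  let flags := captions.map is_integer
  (List.range (captions.length - 2)).filterMap (fun i =>
    if flags.getD i false && !flags.getD (i + 1) false && !flags.getD (i + 2) false
    then some [captions.getD (i + 1) "", captions.getD (i + 2) ""] else none)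

-- ===== PRECONDITION & SPEC =====
def Spec_transcript_to_list (captions : List String) (out : List (List String)) : Prop := out = transcript_to_list_alt captions
instance (captions : List String) (out : List (List String)) : Decidable (Spec_transcript_to_list captions out) := by unfold Spec_transcript_to_list; infer_instance

-- ===== CLAIM (what is proved, stated in full; the proofs are below) =====
def Claim_equal_transcript_to_list : Prop := ∀ (captions : List String), Dom_transcript_to_list captions → Spec_transcript_to_list captions (transcript_to_list captions)

-- ===== LEMMAS AND PROOFS =====

-- Common specification W: emit [b, c] at each 3-window (a, b, c) with a integer and b, c not.
def W : List String → List (List String)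
  | a :: b :: c :: r =>
      (if is_integer a && !is_integer b && !is_integer c then [[b, c]] else []) ++ W (b :: c :: r)
  | _ => []

-- A's three control states of the scanner.
mutual
def fS : List String → List (List String)
  | [] => []
  | x :: xs => if is_integer x then gS xs else fS xs
def gS : List String → List (List String)
  | [] => []
  | x :: xs => if is_integer x then gS xs else hS x xs
def hS : String → List String → List (List String)
  | _, [] => []
  | a, x :: xs => if is_integer x then gS xs else [a, x] :: fS xs
end

lemma A_run (l : List String) : ∀ (acc : List (List String)),
    (∀ li cl, ((l.foldl pvAstep (li, false, cl, acc)).2.2.2 : List (List String)) = acc ++ fS l) ∧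
    (∀ cl, ((l.foldl pvAstep (0, true, cl, acc)).2.2.2 : List (List String)) = acc ++ gS l) ∧
    (∀ a c, ((l.foldl pvAstep (1, true, (a, c), acc)).2.2.2 : List (List String)) = acc ++ hS a l) := by
  induction l with
  | nil => intro acc; simp [fS, gS, hS]
  | cons x xs ih =>
    intro acc
    by_cases hx : is_integer x = true
    · refine ⟨fun li cl => ?_, fun cl => ?_, fun a c => ?_⟩ <;>
        simp [List.foldl_cons, pvAstep, hx, fS, gS, hS, (ih acc).2.1]
    · refine ⟨fun li cl => ?_, fun cl => ?_, fun a c => ?_⟩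
      · simp [List.foldl_cons, pvAstep, hx, fS, (ih acc).1]
      · simp [List.foldl_cons, pvAstep, hx, gS, (ih acc).2.2]
      · simp only [List.foldl_cons, pvAstep, hx, hS, if_false, Bool.false_eq_true]
        simp only [show ((1 : Int) == 0) = false from rfl, show ((1 : Int) == 1) = true from rfl]
        simp [(ih (acc ++ [[a, x]])).1, List.append_assoc]

lemma A_eq_fS (l : List String) : transcript_to_list l = fS l := by
  simpa using ((A_run l []).1 0 ("", ""))

-- A's scanner equals the window characterization.
lemma fS_eq_W : ∀ (n : Nat) (l : List String), l.length ≤ n → fS l = W l := by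
  intro n
  induction n with
  | zero =>
    intro l hl
    have : l = [] := List.length_eq_zero_iff.mp (Nat.le_zero.mp hl)
    subst this; rfl
  | succ n ih =>
    intro l hl
    match l with
    | [] => rfl
    | [x] => by_cases hx : is_integer x = true <;> simp [fS, gS, W, hx]
    | [x, y] =>
        by_cases hx : is_integer x = true <;> by_cases hy : is_integer y = true <;>
          simp [fS, gS, hS, W, hx, hy]
    | a :: b :: c :: r =>
      have iht : fS (b :: c :: r) = W (b :: c :: r) := ih _ (by
        simp only [List.length_cons] at hl ⊢; omega)
      rw [W, ← iht]
      by_cases ha : is_integer a = true <;> by_cases hb : is_integer b = true <;>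
        by_cases hc : is_integer c = true <;> simp [fS, gS, hS, ha, hb, hc]

-- One unfolding step of B's range comprehension when the list has ≥ 3 elements.
lemma B_step (a b c : String) (r : List String) :
    transcript_to_list_alt (a :: b :: c :: r) =
      (if is_integer a && !is_integer b && !is_integer c then [[b, c]] else []) ++
        transcript_to_list_alt (b :: c :: r) := by
  unfold transcript_to_list_alt
  dsimp only
  have hlen : (a :: b :: c :: r).length - 2 = ((b :: c :: r).length - 2) + 1 := by
    simp only [List.length_cons]; omega
  rw [hlen, List.range_succ_eq_map, List.filterMap_cons, List.filterMap_map]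
  have htail : (List.range ((b :: c :: r).length - 2)).filterMap
      ((fun i => if ((a :: b :: c :: r).map is_integer).getD i false &&
            !((a :: b :: c :: r).map is_integer).getD (i + 1) false &&
            !((a :: b :: c :: r).map is_integer).getD (i + 2) false
          then some [(a :: b :: c :: r).getD (i + 1) "", (a :: b :: c :: r).getD (i + 2) ""]
          else none) ∘ Nat.succ) =
      (List.range ((b :: c :: r).length - 2)).filterMap (fun i =>
        if ((b :: c :: r).map is_integer).getD i false &&
            !((b :: c :: r).map is_integer).getD (i + 1) false &&
            !((b :: c :: r).map is_integer).getD (i + 2) false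
        then some [(b :: c :: r).getD (i + 1) "", (b :: c :: r).getD (i + 2) ""] else none) := by
    apply List.filterMap_congr
    intro i _
    simp [Function.comp, Nat.succ_eq_add_one]
  rw [htail]
  split_ifs with h1 h2 <;> simp_all

lemma B_eq_W : ∀ (l : List String), transcript_to_list_alt l = W l := by
  intro l
  induction l with
  | nil => rfl
  | cons a t ih =>
    match t, ih with
    | [], _ => rfl
    | [b], _ => rfl
    | b :: c :: r, ih =>
        rw [B_step, ih]
        rfl

-- ===== VERDICT (by name: the statement is the Claim_ definition above) =====
theorem transcript_to_list_spec : Claim_equal_transcript_to_list := by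
  intro captions _
  unfold Spec_transcript_to_list
  rw [A_eq_fS, B_eq_W, fS_eq_W captions.length captions le_rfl]
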